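-- pv_equiv track=rewrite | github.com/arrowlanguage/arrow | sketches/sketch5.py | store_binding
-- ===== SOURCE A (Python) =====
-- def store_binding(env, name, value):
--     """Store binding (name -> value) in env (name is a list of tokens)."""
--     out = []
--     updated = False
--     for n, v in env:
--         if n == name:
--             out.append([n, value])
--             updated = True
--         else:
--             out.append([n, v])
--     if not updated:
--         out.append([name, value])
--     return out
-- ===== SOURCE B (Python) =====
-- def store_binding(env, name, value):
--     """Store binding (name -> value) in env (name is a list of tokens)."""
--     out = [[n, v] for n, v in env]
--     hits = [i for i, e in enumerate(out) if e[0] == name]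
--     if not hits:
--         out.append([name, value])
--     for i in hits:
--         out[i][1] = value
--     return out
-- ===== Notes on version B (the rewrite author's own statement) =====
-- stated objective: alternative
-- what changed: Instead of A's single flag-carrying rebuild loop, B makes a plain fresh copy, collects the indices of matching keys with enumerate, and then updates the value slot in place by index assignment (appending only when the index list is empty).
-- outside the precondition, e.g. on store_binding([[['a'], ['1'], ['x']]], ['a'], ['2']): A raises ValueError, B raises ValueError
import Mathlib
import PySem

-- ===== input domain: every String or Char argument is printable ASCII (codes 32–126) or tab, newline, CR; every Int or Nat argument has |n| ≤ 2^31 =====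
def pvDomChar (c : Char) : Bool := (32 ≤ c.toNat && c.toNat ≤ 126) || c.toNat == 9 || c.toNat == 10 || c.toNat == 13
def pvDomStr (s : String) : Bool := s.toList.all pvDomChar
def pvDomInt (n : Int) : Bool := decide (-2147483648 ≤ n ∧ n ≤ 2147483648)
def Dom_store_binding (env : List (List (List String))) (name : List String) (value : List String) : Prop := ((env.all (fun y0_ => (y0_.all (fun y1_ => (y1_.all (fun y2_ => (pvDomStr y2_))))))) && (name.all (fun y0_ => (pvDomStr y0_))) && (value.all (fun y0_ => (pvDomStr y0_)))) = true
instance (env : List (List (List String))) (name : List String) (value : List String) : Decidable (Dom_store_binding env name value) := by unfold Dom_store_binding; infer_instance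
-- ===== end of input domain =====

-- B replaces A's flag-carrying rebuild loop by: plain copy, collect matching indices with enumerate, then in-place index assignment (append only if no hits); objective: alternative, same O(n) cost.


-- ===== PORT A =====
-- A: one pass carrying (out, updated); entries are unpacked as [n, v] (Pre_ requires length 2).
def pvAStep (name value : List String) (acc : List (List (List String)) × Bool)
    (e : List (List String)) : List (List (List String)) × Bool :=
  match e with
  | [n, v] =>
    if n = name then (acc.1 ++ [[n, value]], true)
    else (acc.1 ++ [[n, v]], acc.2)
  | _ => acc  -- Python raises ValueError here; excluded by Pre_

def store_binding (env : List (List (List String))) (name : List String) (value : List String) : List (List (List String)) :=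
  let st := env.foldl (pvAStep name value) ([], false)
  if st.2 = false then st.1 ++ [[name, value]] else st.1

-- ===== PORT B =====
-- B: fresh copy, hit indices via enumerate, then in-place index assignment out[i][1] = value.
def pvBCopy (e : List (List String)) : List (List String) :=
  match e with
  | [n, v] => [n, v]
  | _ => e  -- Python raises ValueError (unpacking) here; excluded by Pre_

-- hits = [i for i, e in enumerate(out) if e[0] == name]
def pvHits (name : List String) (out : List (List (List String))) : List Int :=
  (PySem.List.enumerate out).filterMap
    (fun p => if PySem.List.pyGet? p.2 0 = some name then some p.1 else none)

-- out[i][1] = value (Python item assignment; indices come from enumerate, always in range)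
def pvBUpd (value : List String) (acc : List (List (List String))) (i : Int) : List (List (List String)) :=
  match PySem.List.pyGet? acc i with
  | some e => PySem.List.pySetD acc i (PySem.List.pySetD e 1 value)
  | none => acc

def store_binding_alt (env : List (List (List String))) (name : List String) (value : List String) : List (List (List String)) :=
  let out := env.map pvBCopy
  let hits := pvHits name out
  let out := if hits = [] then out ++ [[name, value]] else out
  hits.foldl (pvBUpd value) out

-- ===== PRECONDITION & SPEC =====
-- Pre_ excludes env entries that are not 2-element pairs, on which Python's tuple unpacking raises ValueError.
def Pre_store_binding (env : List (List (List String))) (name : List String) (value : List String) : Prop :=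
  ∀ e ∈ env, e.length = 2
instance (env : List (List (List String))) (name : List String) (value : List String) : Decidable (Pre_store_binding env name value) := by unfold Pre_store_binding; infer_instance
def pvWitness_store_binding : List (List (List String)) × List String × List String :=
  ([[["a"], ["1"]], [["b", "c"], ["2"]]], ["a"], ["9"])
def Spec_store_binding (env : List (List (List String))) (name : List String) (value : List String) (out : List (List (List String))) : Prop := out = store_binding_alt env name value
instance (env : List (List (List String))) (name : List String) (value : List String) (out : List (List (List String))) : Decidable (Spec_store_binding env name value out) := by unfold Spec_store_binding; infer_instance

-- ===== CLAIM (what is proved, stated in full; the proofs are below) =====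
def Claim_equal_store_binding : Prop := ∀ (env : List (List (List String))) (name : List String) (value : List String), Dom_store_binding env name value → Pre_store_binding env name value → Spec_store_binding env name value (store_binding env name value)

-- ===== LEMMAS AND PROOFS =====
-- The replacement function both sides compute (per entry, for length-2 entries).
def pvRewrite (name value : List String) (e : List (List String)) : List (List String) :=
  match e with
  | [n, v] => if n = name then [n, value] else [n, v]
  | _ => e

theorem pvBCopy_id (e : List (List String)) : pvBCopy e = e := by
  unfold pvBCopy
  match e with
  | [] => rfl
  | [_] => rfl
  | [_, _] => rfl
  | _ :: _ :: _ :: _ => rfl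

-- A's fold from an arbitrary accumulator: output part is the rewrite map, flag is old-flag OR membership.
theorem foldA_char (name value : List String) :
    ∀ (env : List (List (List String))) (out : List (List (List String))) (upd : Bool),
    (∀ e ∈ env, e.length = 2) →
    env.foldl (pvAStep name value) (out, upd)
      = (out ++ env.map (pvRewrite name value), upd || env.any (fun e => PySem.List.pyGet? e 0 = some name)) := by
  intro env
  induction env with
  | nil => intro out upd _; simp
  | cons e rest ih =>
    intro out upd h
    have he : e.length = 2 := h e (by simp)
    match e, he with
    | [n, v], _ =>
      by_cases hn : n = name <;>
        simp [List.foldl_cons, pvAStep, pvRewrite, hn,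
          ih _ _ (fun x hx => h x (by simp [hx]))]

-- Structural step of the hit-index list, with an arbitrary start index.
def pvHitsFrom (name : List String) (out : List (List (List String))) (s : Int) : List Int :=
  (PySem.List.enumerate out s).filterMap
    (fun p => if PySem.List.pyGet? p.2 0 = some name then some p.1 else none)

theorem pvHits_eq (name : List String) (out : List (List (List String))) :
    pvHits name out = pvHitsFrom name out 0 := rfl

theorem pvHitsFrom_cons (name : List String) (e : List (List String))
    (rest : List (List (List String))) (s : Int) :
    pvHitsFrom name (e :: rest) s
      = (if PySem.List.pyGet? e 0 = some name then [s] else []) ++ pvHitsFrom name rest (s + 1) := by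
  unfold pvHitsFrom
  by_cases h : PySem.List.pyGet? e 0 = some name <;>
    simp [PySem.List.enumerate_cons, h]

theorem pvHitsFrom_nil_iff (name : List String) :
    ∀ (out : List (List (List String))) (s : Int),
    (pvHitsFrom name out s = [] ↔ out.any (fun e => PySem.List.pyGet? e 0 = some name) = false) := by
  intro out
  induction out with
  | nil => intro s; simp [pvHitsFrom]
  | cons e rest ih =>
    intro s
    rw [pvHitsFrom_cons]
    by_cases h : PySem.List.pyGet? e 0 = some name <;> simp [h, ih (s + 1)]

-- The in-place update loop over the hit indices rewrites exactly the matching entries.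
theorem foldB_char (name value : List String) :
    ∀ (xs pre : List (List (List String))),
    (∀ e ∈ xs, e.length = 2) →
    (pvHitsFrom name xs (pre.length : Int)).foldl (pvBUpd value) (pre ++ xs)
      = pre ++ xs.map (pvRewrite name value) := by
  intro xs
  induction xs with
  | nil => intro pre _; simp [pvHitsFrom]
  | cons e rest ih =>
    intro pre h
    have he : e.length = 2 := h e (by simp)
    have hrest : ∀ x ∈ rest, x.length = 2 := fun x hx => h x (by simp [hx])
    rw [pvHitsFrom_cons]
    match e, he with
    | [n, v], _ =>
      by_cases hn : n = name
      · -- a hit at index pre.length: rewrite in place, then recurse past it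
        subst hn
        have hget := PySem.List.pyGet?_append_length pre rest [n, v]
        have hstep : pvBUpd value (pre ++ [n, v] :: rest) (pre.length : Int)
            = (pre ++ [[n, value]]) ++ rest := by
          unfold pvBUpd
          rw [hget]
          show PySem.List.pySetD (pre ++ [n, v] :: rest) (pre.length : Int)
              (PySem.List.pySetD [n, v] 1 value) = _
          have hinner : PySem.List.pySetD [n, v] 1 value = [n, value] := rfl
          rw [hinner, PySem.List.pySetD_natCast, List.set_append]
          simp
        have ihh := ih (pre ++ [[n, value]]) hrest
        simp only [List.length_append, List.length_cons, List.length_nil] at ihh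
        push_cast at ihh
        rw [if_pos (by simp), List.singleton_append, List.foldl_cons, hstep, ihh]
        simp [pvRewrite]
      · -- no hit here: the remaining updates only touch the tail
        have ihh := ih (pre ++ [[n, v]]) hrest
        simp only [List.length_append, List.length_cons, List.length_nil] at ihh
        push_cast at ihh
        rw [if_neg (by simp [hn]), List.nil_append]
        have hb : pre ++ [n, v] :: rest = (pre ++ [[n, v]]) ++ rest := by simp
        rw [hb, ihh]
        simp [pvRewrite, hn]

-- ===== VERDICT (by name: the statement is the Claim_ definition above) =====
theorem store_binding_spec : Claim_equal_store_binding := by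
  intro env name value _ hpre
  unfold Spec_store_binding store_binding store_binding_alt
  rw [foldA_char name value env [] false hpre]
  have hcopy : env.map pvBCopy = env := by
    simp [List.map_congr_left (fun e _ => pvBCopy_id e)]
  simp only [hcopy, pvHits_eq]
  by_cases hp : env.any (fun e => PySem.List.pyGet? e 0 = some name) = true
  · -- some key matches: no final append on either side
    have hne : ¬ (pvHitsFrom name env 0 = []) := by
      rw [pvHitsFrom_nil_iff]
      simp [hp]
    rw [if_neg hne]
    have hfold := foldB_char name value env [] hpre
    simp only [List.length_nil, Nat.cast_zero, List.nil_append] at hfold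
    rw [hfold]
    simp [hp]
  · -- no key matches: both sides append the new binding; the rewrite map is the identity
    rw [Bool.not_eq_true] at hp
    have hnil : pvHitsFrom name env 0 = [] := by rw [pvHitsFrom_nil_iff]; exact hp
    rw [if_pos hnil, hnil, List.foldl_nil]
    rw [Bool.false_or, hp, if_pos rfl]
    congr 1
    conv_rhs => rw [← List.map_id env]
    apply List.map_congr_left
    intro e he
    have h2 := hpre e he
    match e, h2 with
    | [n, v], _ =>
      have hnn : ¬ (n = name) := by
        intro hnn
        rw [List.any_eq_false] at hp
        have := hp _ he
        simp [hnn] at this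
      simp [pvRewrite, hnn]
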